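-- pv_equiv track=rewrite | github.com/ychleee/carfarm-predictor | backend/app/services/retail_estimator.py | _adaptive_bandwidth
-- ===== SOURCE A (Python) =====
-- import math
--
-- def _adaptive_bandwidth(data: list[tuple], target_mileage: int) -> int:
--     """데이터 밀도에 따른 적응형 bandwidth.
--
--     sqrt(n) 기반 최근접 이웃: 데이터가 많을수록 좁게, 적을수록 넓게.
--     데이터가 희소하거나 대상이 데이터 범위 경계에 있으면 대역폭 확대.
--     """
--     n = len(data)
--     if n <= 3:
--         return 80000
--     mileages = sorted(d[0] for d in data)
--     distances = sorted(abs(d[0] - target_mileage) for d in data)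
--     k = min(max(int(math.sqrt(n)), 5), 25)  # sqrt(n), 5~25 범위
--     k = min(k, n - 1)
--     bw = max(distances[k], 10000)  # 최소 10,000km
--
--     # 데이터 희소 또는 경계: 최소 3개 이상 유효 가중치(w>=0.1)를 보장
--     max_bw = 40000
--     if n <= 10:
--         max_bw = 80000  # 소량 데이터 → 넓은 대역폭
--     elif target_mileage >= mileages[-1] - 20000 or target_mileage <= mileages[0] + 20000:
--         max_bw = 60000  # 경계 근처 → 대역폭 확대
--     return min(bw, max_bw)
-- ===== SOURCE B (Python) =====
-- import math
--
-- def _adaptive_bandwidth(data: list, target_mileage: int) -> int: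
--     n = len(data)
--     if n <= 3:
--         return 80000
--     lo = min(d[0] for d in data)
--     hi = max(d[0] for d in data)
--     k = min(max(int(math.sqrt(n)), 5), 25)
--     k = min(k, n - 1)
--     # quickselect: k-th smallest absolute distance, no full sort
--     xs = [abs(d[0] - target_mileage) for d in data]
--     while True:
--         p = xs[len(xs) // 2]
--         lt = [x for x in xs if x < p]
--         if k < len(lt):
--             xs = lt
--             continue
--         ecnt = len([x for x in xs if x == p])
--         if k < len(lt) + ecnt:
--             kth = p
--             break
--         xs = [x for x in xs if x > p]
--         k -= len(lt) + ecnt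
--     bw = max(kth, 10000)
--     max_bw = 40000
--     if n <= 10:
--         max_bw = 80000
--     elif target_mileage >= hi - 20000 or target_mileage <= lo + 20000:
--         max_bw = 60000
--     return min(bw, max_bw)
-- ===== Notes on version B (the rewrite author's own statement) =====
-- stated objective: alternative
-- what changed: A sorts both the mileage list and the distance list and indexes into them; B replaces them by builtin min/max over the mileages and a middle-pivot quickselect loop that finds only the k-th smallest distance without sorting.
-- outside the precondition, e.g. on _adaptive_bandwidth([(0,), (), (20,), (30,)], 5): A raises IndexError, B raises IndexError
import Mathlib
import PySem

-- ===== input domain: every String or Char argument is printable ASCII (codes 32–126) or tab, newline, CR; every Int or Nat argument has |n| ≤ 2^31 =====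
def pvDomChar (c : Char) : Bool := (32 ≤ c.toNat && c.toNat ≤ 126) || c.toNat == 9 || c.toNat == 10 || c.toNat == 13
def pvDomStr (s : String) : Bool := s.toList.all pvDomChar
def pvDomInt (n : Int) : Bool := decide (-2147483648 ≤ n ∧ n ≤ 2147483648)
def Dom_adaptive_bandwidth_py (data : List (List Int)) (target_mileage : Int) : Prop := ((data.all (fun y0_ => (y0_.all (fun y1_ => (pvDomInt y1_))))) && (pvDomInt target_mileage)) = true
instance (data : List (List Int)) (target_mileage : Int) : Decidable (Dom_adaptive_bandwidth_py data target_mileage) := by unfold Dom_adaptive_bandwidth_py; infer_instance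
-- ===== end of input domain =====

-- B replaces A's two full sorts by a single min/max pass over the mileages and a
-- middle-pivot quickselect of the k-th smallest distance (no full sort); same return value.

-- ===== PORT A =====
-- d[0] is ported as pyGetD d 0 0: Pre_ guarantees every row is nonempty when n > 3, so the default is never read.
-- int(math.sqrt(n)) is ported as Nat.sqrt n: after the clamp to [5,25] the two agree for every n
-- (they coincide exactly for n < 626, and both clamp to 25 beyond).
def adaptive_bandwidth_py (data : List (List Int)) (target_mileage : Int) : Int :=
  let n := data.length
  if n ≤ 3 then 80000
  else
    let mileages := PySem.List.sorted (data.map (fun d => PySem.List.pyGetD d 0 0)) (fun x => x)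
    let distances := PySem.List.sorted (data.map (fun d => |PySem.List.pyGetD d 0 0 - target_mileage|)) (fun x => x)
    let k := min (max (Nat.sqrt n) 5) 25
    let k := min k (n - 1)
    let bw := max (PySem.List.pyGetD distances (k : Int) 0) 10000
    let max_bw : Int :=
      if n ≤ 10 then 80000
      else if target_mileage ≥ PySem.List.pyGetD mileages (-1) 0 - 20000 ∨
              target_mileage ≤ PySem.List.pyGetD mileages 0 0 + 20000 then 60000
      else 40000
    min bw max_bw

-- ===== PORT B =====
-- the middle element xs[len(xs)//2] of a nonempty list is a member (cited by the port's decreasing_by)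
lemma pv_mid_mem (p0 : Int) (t : List Int) :
    (p0 :: t).getD ((p0 :: t).length / 2) p0 ∈ (p0 :: t) := by
  have h : (p0 :: t).length / 2 < (p0 :: t).length :=
    Nat.div_lt_self (by simp) one_lt_two
  rw [List.getD_eq_getElem?_getD, List.getElem?_eq_getElem h]
  exact List.getElem_mem h

-- Source B's quickselect while-loop, written as the equivalent recursion (each iteration rebinds xs/k);
-- the pivot xs[len(xs)//2] is ported as getD (len/2): the index is in range, so the default is never read.
def pvQuickselect (xs : List Int) (k : Nat) : Int :=
  match xs with
  | [] => 0  -- unreachable: the loop is only entered with k < xs.length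
  | p0 :: t =>
    let p := (p0 :: t).getD ((p0 :: t).length / 2) p0
    let lt := (p0 :: t).filter (fun x => x < p)
    if k < lt.length then pvQuickselect lt k
    else
      let ecnt := ((p0 :: t).filter (fun x => x = p)).length
      if k < lt.length + ecnt then p
      else pvQuickselect ((p0 :: t).filter (fun x => p < x)) (k - (lt.length + ecnt))
termination_by xs.length
decreasing_by
  · exact List.length_filter_lt_length_iff_exists.mpr ⟨_, pv_mid_mem p0 t, by simp⟩
  · exact List.length_filter_lt_length_iff_exists.mpr ⟨_, pv_mid_mem p0 t, by simp⟩

def adaptive_bandwidth_py_alt (data : List (List Int)) (target_mileage : Int) : Int :=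
  let n := data.length
  if n ≤ 3 then 80000
  else
    let lo := (PySem.List.min? (data.map (fun d => PySem.List.pyGetD d 0 0)) (fun x => x)).getD 0
    let hi := (PySem.List.max? (data.map (fun d => PySem.List.pyGetD d 0 0)) (fun x => x)).getD 0
    let k := min (max (Nat.sqrt n) 5) 25
    let k := min k (n - 1)
    let kth := pvQuickselect (data.map (fun d => |PySem.List.pyGetD d 0 0 - target_mileage|)) k
    let bw := max kth 10000
    let max_bw : Int :=
      if n ≤ 10 then 80000
      else if target_mileage ≥ hi - 20000 ∨ target_mileage ≤ lo + 20000 then 60000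
      else 40000
    min bw max_bw

-- ===== PRECONDITION & SPEC =====
-- Pre_ excludes only inputs on which A raises IndexError: an empty row d with d[0] evaluated (n > 3).
def Pre_adaptive_bandwidth_py (data : List (List Int)) (target_mileage : Int) : Prop :=
  3 < data.length → ∀ r ∈ data, r ≠ []
instance (data : List (List Int)) (target_mileage : Int) : Decidable (Pre_adaptive_bandwidth_py data target_mileage) := by unfold Pre_adaptive_bandwidth_py; infer_instance

def pvWitness_adaptive_bandwidth_py : List (List Int) × Int := ([[0], [10], [20], [30]], 5)

def Spec_adaptive_bandwidth_py (data : List (List Int)) (target_mileage : Int) (out : Int) : Prop := out = adaptive_bandwidth_py_alt data target_mileage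
instance (data : List (List Int)) (target_mileage : Int) (out : Int) : Decidable (Spec_adaptive_bandwidth_py data target_mileage out) := by unfold Spec_adaptive_bandwidth_py; infer_instance

-- ===== CLAIM (what is proved, stated in full; the proofs are below) =====
def Claim_equal_adaptive_bandwidth_py : Prop := ∀ (data : List (List Int)) (target_mileage : Int), Dom_adaptive_bandwidth_py data target_mileage → Pre_adaptive_bandwidth_py data target_mileage → Spec_adaptive_bandwidth_py data target_mileage (adaptive_bandwidth_py data target_mileage)

-- ===== LEMMAS AND PROOFS =====

-- sorted(xs) splits at any pivot p ∈ xs into (sorted below p) ++ (the copies of p) ++ (sorted above p).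
lemma pv_sorted_split (xs : List Int) (p : Int) :
    PySem.List.sorted xs (fun x => x) =
      PySem.List.sorted (xs.filter (fun x => x < p)) (fun x => x)
      ++ xs.filter (fun x => x = p)
      ++ PySem.List.sorted (xs.filter (fun x => p < x)) (fun x => x) := by
  apply PySem.List.sorted_id_eq_of_perm_of_pairwise
  · have h1 : (xs.filter (fun x => decide (x < p)) ++ xs.filter (fun x => !decide (x < p))).Perm xs :=
      List.filter_append_perm _ xs
    have h2 : ((xs.filter (fun x => !decide (x < p))).filter (fun x => decide (x = p))
        ++ (xs.filter (fun x => !decide (x < p))).filter (fun x => !decide (x = p))).Perm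
        (xs.filter (fun x => !decide (x < p))) := List.filter_append_perm _ _
    have e1 : (xs.filter (fun x => !decide (x < p))).filter (fun x => decide (x = p))
        = xs.filter (fun x => x = p) := by
      rw [List.filter_filter]
      apply List.filter_congr
      intro x _
      by_cases h : x = p <;> simp [h]
    have e2 : (xs.filter (fun x => !decide (x < p))).filter (fun x => !decide (x = p))
        = xs.filter (fun x => p < x) := by
      rw [List.filter_filter]
      apply List.filter_congr
      intro x _
      by_cases h : x = p
      · simp [h]
      · by_cases h2 : x < p <;> simp [h, h2] <;> omega
    rw [e1, e2] at h2
    have hper : ((PySem.List.sorted (xs.filter (fun x => x < p)) (fun x => x)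
          ++ xs.filter (fun x => x = p))
          ++ PySem.List.sorted (xs.filter (fun x => p < x)) (fun x => x)).Perm
        ((xs.filter (fun x => x < p) ++ xs.filter (fun x => x = p))
          ++ xs.filter (fun x => p < x)) :=
      List.Perm.append (List.Perm.append (PySem.List.sorted_perm _ _ _) (List.Perm.refl _))
        (PySem.List.sorted_perm _ _ _)
    refine hper.trans ?_
    rw [List.append_assoc]
    exact (List.Perm.append (List.Perm.refl _) h2).trans h1
  · have hmemA : ∀ a ∈ PySem.List.sorted (xs.filter (fun x => x < p)) (fun x => x), a < p := by
      intro a ha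
      have := (PySem.List.mem_sorted _ _ _ _).mp ha
      simpa using (List.mem_filter.mp this).2
    have hmemE : ∀ a ∈ xs.filter (fun x => x = p), a = p := by
      intro a ha; simpa using (List.mem_filter.mp ha).2
    have hmemG : ∀ a ∈ PySem.List.sorted (xs.filter (fun x => p < x)) (fun x => x), p < a := by
      intro a ha
      have := (PySem.List.mem_sorted _ _ _ _).mp ha
      simpa using (List.mem_filter.mp this).2
    rw [List.pairwise_append]
    refine ⟨?_, PySem.List.sorted_pairwise _ _, ?_⟩
    · rw [List.pairwise_append]
      refine ⟨PySem.List.sorted_pairwise _ _, List.pairwise_of_forall_mem_list ?_, ?_⟩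
      · intro a ha b hb
        have := hmemE a ha
        have := hmemE b hb
        omega
      · intro a ha b hb
        have := hmemA a ha
        have := hmemE b hb
        omega
    · intro a ha b hb
      have hb' := hmemG b hb
      rcases List.mem_append.mp ha with ha | ha
      · have := hmemA a ha; omega
      · have := hmemE a ha; omega

-- quickselect returns sorted(xs)[k] for k < |xs|  (strong induction on |xs|)
lemma pv_qsel_correct : ∀ (m : Nat) (xs : List Int) (k : Nat), xs.length ≤ m → k < xs.length →
    (PySem.List.sorted xs (fun x => x))[k]? = some (pvQuickselect xs k) := by
  intro m
  induction m with
  | zero => intro xs k hm hk; omega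
  | succ m ih =>
    intro xs k hm hk
    match xs with
    | [] => simp at hk
    | p0 :: t =>
      rw [pvQuickselect]
      set p := (p0 :: t).getD ((p0 :: t).length / 2) p0 with hpdef
      have hpmem : p ∈ p0 :: t := pv_mid_mem p0 t
      have hsplit := pv_sorted_split (p0 :: t) p
      have hlen : (p0 :: t).length
          = ((p0 :: t).filter (fun x => x < p)).length
            + ((p0 :: t).filter (fun x => x = p)).length
            + ((p0 :: t).filter (fun x => p < x)).length := by
        have hc := congrArg List.length hsplit
        simp only [List.length_append, PySem.List.length_sorted] at hc
        omega
      have hltlen : ((p0 :: t).filter (fun x => x < p)).length < (p0 :: t).length :=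
        List.length_filter_lt_length_iff_exists.mpr ⟨p, hpmem, by simp⟩
      have hgtlen : ((p0 :: t).filter (fun x => p < x)).length < (p0 :: t).length :=
        List.length_filter_lt_length_iff_exists.mpr ⟨p, hpmem, by simp⟩
      rw [hsplit]
      by_cases h1 : k < ((p0 :: t).filter (fun x => x < p)).length
      · rw [if_pos h1]
        rw [List.getElem?_append_left
          (by simp only [List.length_append, PySem.List.length_sorted]; omega)]
        rw [List.getElem?_append_left (by rw [PySem.List.length_sorted]; omega)]
        exact ih _ k (by omega) h1
      · rw [if_neg h1]
        by_cases h2 : k < ((p0 :: t).filter (fun x => x < p)).length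
            + ((p0 :: t).filter (fun x => x = p)).length
        · rw [if_pos h2]
          rw [List.getElem?_append_left
            (by simp only [List.length_append, PySem.List.length_sorted]; omega)]
          rw [List.getElem?_append_right (by rw [PySem.List.length_sorted]; omega)]
          have hj : k - (PySem.List.sorted ((p0 :: t).filter (fun x => x < p)) (fun x => x)).length
              < ((p0 :: t).filter (fun x => x = p)).length := by
            rw [PySem.List.length_sorted]; omega
          rw [List.getElem?_eq_getElem hj]
          have hmem := List.getElem_mem hj
          have he : ((p0 :: t).filter (fun x => x = p))[k -
              (PySem.List.sorted ((p0 :: t).filter (fun x => x < p)) (fun x => x)).length]'hj = p := by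
            simpa using (List.mem_filter.mp hmem).2
          rw [he]
        · rw [if_neg h2]
          rw [List.getElem?_append_right
            (by simp only [List.length_append, PySem.List.length_sorted]; omega)]
          have hk' : k - (((p0 :: t).filter (fun x => x < p)).length
              + ((p0 :: t).filter (fun x => x = p)).length)
              < ((p0 :: t).filter (fun x => p < x)).length := by omega
          have hih := ih ((p0 :: t).filter (fun x => p < x))
            (k - (((p0 :: t).filter (fun x => x < p)).length
              + ((p0 :: t).filter (fun x => x = p)).length)) (by omega) hk'
          have hidx : k - ((PySem.List.sorted ((p0 :: t).filter (fun x => x < p)) (fun x => x)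
              ++ (p0 :: t).filter (fun x => x = p)).length)
              = k - (((p0 :: t).filter (fun x => x < p)).length
                + ((p0 :: t).filter (fun x => x = p)).length) := by
            simp only [List.length_append, PySem.List.length_sorted]
          rw [hidx, ← hih]

-- sorted(xs)[0] is min(xs)
lemma pv_head_sorted_min (xs : List Int) (h : xs ≠ []) :
    PySem.List.pyGetD (PySem.List.sorted xs (fun x => x)) 0 0
      = (PySem.List.min? xs (fun x => x)).getD 0 := by
  cases hs : PySem.List.sorted xs (fun x => x) with
  | nil => exact absurd ((PySem.List.sorted_eq_nil_iff _ _ _).mp hs) h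
  | cons a t =>
    cases hmin : PySem.List.min? xs (fun x => x) with
    | none => exact absurd ((PySem.List.min?_eq_none_iff _ _).mp hmin) h
    | some mn =>
      have h1 : a ≤ mn := PySem.List.key_head_sorted_le xs (fun x => x) hs mn (PySem.List.min?_mem hmin)
      have h2 : mn ≤ a := PySem.List.min?_isMin hmin a
        ((PySem.List.mem_sorted xs _ false a).mp (hs ▸ List.mem_cons_self))
      have : a = mn := le_antisymm h1 h2
      simp [PySem.List.pyGetD, PySem.List.pyGet?, PySem.List.pyIdx?, this]

-- sorted(xs)[-1] is max(xs)
lemma pv_last_sorted_max (xs : List Int) (h : xs ≠ []) :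
    PySem.List.pyGetD (PySem.List.sorted xs (fun x => x)) (-1) 0
      = (PySem.List.max? xs (fun x => x)).getD 0 := by
  have hlen : (PySem.List.sorted xs (fun x => x)).length = xs.length := PySem.List.length_sorted _ _ _
  have hpos : 0 < xs.length := List.length_pos_iff.mpr h
  cases hmax : PySem.List.max? xs (fun x => x) with
  | none => exact absurd ((PySem.List.max?_eq_none_iff _ _).mp hmax) h
  | some mx =>
    have hidx : xs.length - 1 < (PySem.List.sorted xs (fun x => x)).length := by omega
    have hgl : PySem.List.pyGetD (PySem.List.sorted xs (fun x => x)) (-1) 0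
        = (PySem.List.sorted xs (fun x => x))[xs.length - 1] := by
      simp only [PySem.List.pyGetD, PySem.List.pyGet?, PySem.List.pyIdx?, hlen]
      have h1 : ¬ (0 : Int) ≤ -1 := by omega
      have h2 : -(xs.length : Int) ≤ -1 := by omega
      rw [if_neg h1, if_pos h2]
      simp [List.getElem?_eq_getElem hidx]
    rw [hgl]
    set e := (PySem.List.sorted xs (fun x => x))[xs.length - 1] with he
    have hmem : e ∈ xs := (PySem.List.mem_sorted xs _ false e).mp (List.getElem_mem hidx)
    have h1 : e ≤ mx := PySem.List.max?_isMax hmax e hmem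
    have h2 : mx ≤ e := by
      have hmx : mx ∈ PySem.List.sorted xs (fun x => x) :=
        (PySem.List.mem_sorted xs _ false mx).mpr (PySem.List.max?_mem hmax)
      obtain ⟨i, hi, hie⟩ := List.mem_iff_getElem.mp hmx
      rw [← hie]
      exact PySem.List.sorted_id_getElem_mono xs (by omega) hidx
    simp [le_antisymm h1 h2]

-- ===== VERDICT (by name: the statement is the Claim_ definition above) =====
theorem adaptive_bandwidth_py_spec : Claim_equal_adaptive_bandwidth_py := by
  intro data target_mileage _hdom hpre
  unfold Spec_adaptive_bandwidth_py
  by_cases h3 : data.length ≤ 3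
  · simp [adaptive_bandwidth_py, adaptive_bandwidth_py_alt, h3]
  · have hne : data ≠ [] := by intro h; subst h; simp at h3
    have hms : data.map (fun d => PySem.List.pyGetD d 0 0) ≠ [] := by simpa using hne
    have hk : min (min (max (Nat.sqrt data.length) 5) 25) (data.length - 1)
        < (data.map (fun d => |PySem.List.pyGetD d 0 0 - target_mileage|)).length := by
      rw [List.length_map]; omega
    have hq := pv_qsel_correct _ _ _ (le_refl _) hk
    have hdist : PySem.List.pyGetD
        (PySem.List.sorted (data.map (fun d => |PySem.List.pyGetD d 0 0 - target_mileage|)) (fun x => x))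
        ((min (min (max (Nat.sqrt data.length) 5) 25) (data.length - 1) : Nat) : Int) 0
        = pvQuickselect (data.map (fun d => |PySem.List.pyGetD d 0 0 - target_mileage|))
            (min (min (max (Nat.sqrt data.length) 5) 25) (data.length - 1)) := by
      rw [PySem.List.pyGetD_eq_getElem _ 0 (by positivity)
        (by rw [PySem.List.length_sorted]; exact_mod_cast hk)]
      simp only [Int.toNat_natCast]
      rw [List.getElem?_eq_getElem (by rw [PySem.List.length_sorted]; exact hk)] at hq
      exact Option.some_inj.mp hq
    simp only [adaptive_bandwidth_py, adaptive_bandwidth_py_alt, if_neg h3]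
    rw [pv_head_sorted_min _ hms, pv_last_sorted_max _ hms, hdist]
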